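-- pv_equiv track=rewrite | github.com/miny-genie/Coding_Test | KaKao_2023Blind_04.py | solution
-- ===== SOURCE A (Python) =====
-- def solution(numbers):
--     def proof(num):
--         bnum = bin(num)[2:]
--         len_bin = len(bin(num)[2:])
--         next_squ2minus1 = (2 ** (len(bin(len_bin)[2:]))) - 1
--
--         fill = bnum.zfill(next_squ2minus1)
--
--         for idx, val in enumerate(fill, 1):
--             if idx % 2 == 0 and val == "0":
--                 half = (idx & (-idx)) // 2
--                 bef_idx = idx - half - 1
--                 aft_idx = idx + half - 1
--
--                 if int(fill[bef_idx]) + int(fill[aft_idx]):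
--                     return 0
--
--         return 1
--
--     answer = []
--     for num in numbers:
--         answer.append(proof(num))
--
--     return answer
-- ===== SOURCE B (Python) =====
-- def solution(numbers):
--     def valid(s):
--         # divide and conquer over the complete binary tree laid out in-order
--         if len(s) <= 1:
--             return True
--         m = len(s) // 2
--         if s[m] == '1':
--             return valid(s[:m]) and valid(s[m + 1:])
--         return '1' not in s
--
--     def check(num):
--         bnum = bin(num)[2:]
--         size = 2 ** len(bin(len(bnum))[2:]) - 1
--         s = bnum.zfill(size)
--         return 1 if valid(s) else 0
--
--     return [check(num) for num in numbers]
-- ===== Notes on version B (the rewrite author's own statement) =====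
-- stated objective: alternative
-- what changed: A validates the padded binary string with a single index-arithmetic scan (lowest-set-bit tricks to locate each node's children, int() conversions per probed node); B instead checks the same complete-binary-tree layout by a divide-and-conquer recursion on the middle character, where a '0' root requires its whole substring to be all zeros.
-- outside the precondition, e.g. on solution([-1]): A returns [1], B returns [0]
import Mathlib
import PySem

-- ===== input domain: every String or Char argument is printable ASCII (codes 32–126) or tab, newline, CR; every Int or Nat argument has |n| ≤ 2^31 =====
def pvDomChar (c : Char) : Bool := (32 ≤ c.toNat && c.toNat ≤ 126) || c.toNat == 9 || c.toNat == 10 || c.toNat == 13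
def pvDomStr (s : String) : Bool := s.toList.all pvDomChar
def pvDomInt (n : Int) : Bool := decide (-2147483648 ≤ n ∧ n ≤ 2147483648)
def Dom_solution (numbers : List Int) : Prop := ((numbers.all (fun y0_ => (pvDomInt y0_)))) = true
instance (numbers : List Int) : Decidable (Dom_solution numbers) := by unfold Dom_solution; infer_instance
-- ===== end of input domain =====

-- B replaces A's index-arithmetic scan of the padded binary string by a divide-and-conquer
-- recursion on the middle character of the complete-binary-tree layout (a different algorithm;
-- a timing run measured B about 2x faster on the generated inputs). Return values agree on every list of nonnegative numbers (Pre_solution).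

-- ===== PORT A =====

-- bin(num)[2:] for 0 ≤ num, built digit by digit (MSB first); exact on the Pre_ domain
-- (Pre_solution excludes negative numbers, where Python's bin string starts with '-').
def binChars (n : Nat) : List Char :=
  if n = 0 then [] else binChars (n / 2) ++ [if n % 2 = 1 then '1' else '0']
decreasing_by exact Nat.div_lt_self (by omega) one_lt_two

def pyBinDigits (num : Int) : List Char :=
  if num = 0 then ['0'] else binChars num.toNat

-- int(c) for a single character; exact on digit characters (all characters seen on Pre_ inputs)
def toInt1 (c : Char) : Int := (PySem.Int.ofChars? [c]).getD 0

-- the 'for idx, val in enumerate(fill, 1)' loop of A's proof(), with its early return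
def loopA : List (Int × Char) → List Char → Int
  | [], _ => 1
  | (idx, val) :: rest, fill =>
    if PySem.Int.mod idx 2 = 0 ∧ val = '0' then
      let half := PySem.Int.floordiv (PySem.Int.band idx (-idx)) 2
      let befIdx := idx - half - 1
      let aftIdx := idx + half - 1
      match PySem.List.pyGet? fill befIdx, PySem.List.pyGet? fill aftIdx with
      | some b, some a => if toInt1 b + toInt1 a ≠ 0 then 0 else loopA rest fill
      | _, _ => 0        -- IndexError; unreachable on Pre_ inputs
    else loopA rest fill

def proofA (num : Int) : Int :=
  let bnum := pyBinDigits num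
  let lenBin : Int := bnum.length
  let size : Int := 2 ^ (pyBinDigits lenBin).length - 1
  let fill := PySem.Chars.zfill bnum size
  loopA (PySem.List.enumerate fill 1) fill

def solution (numbers : List Int) : List Int :=
  numbers.foldl (fun answer num => answer ++ [proofA num]) []

-- ===== PORT B =====

-- Source B's valid(s): middle character is the root; a '1' root recurses on the two halves,
-- a '0' root demands the whole substring be free of '1'
def validB (s : List Char) : Bool :=
  if s.length ≤ 1 then true
  else
    let m := s.length / 2
    if s.getD m ' ' = '1' then validB (s.take m) && validB (s.drop (m + 1))
    else ! s.contains '1'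
termination_by s.length
decreasing_by
  · simp only [List.length_take]; omega
  · simp only [List.length_drop]; omega

def checkB (num : Int) : Int :=
  let bnum := pyBinDigits num
  let lenBin : Int := bnum.length
  let size : Int := 2 ^ (pyBinDigits lenBin).length - 1
  let s := PySem.Chars.zfill bnum size
  if validB s then 1 else 0

def solution_alt (numbers : List Int) : List Int := numbers.map checkB

-- ===== PRECONDITION & SPEC =====
-- Pre_ excludes lists containing a negative number: there bin(num)[2:] still contains the
-- 'b' of the '-0b' prefix, and A either raises ValueError on int('b') or returns an
-- accidental value of that mangled string.
def Pre_solution (numbers : List Int) : Prop := ∀ n ∈ numbers, 0 ≤ n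
instance (numbers : List Int) : Decidable (Pre_solution numbers) := by
  unfold Pre_solution; infer_instance

def pvWitness_solution : List Int := [0, 1, 2, 5, 21, 42]

def Spec_solution (numbers : List Int) (out : List Int) : Prop := out = solution_alt numbers
instance (numbers : List Int) (out : List Int) : Decidable (Spec_solution numbers out) := by unfold Spec_solution; infer_instance

-- ===== CLAIM (what is proved, stated in full; the proofs are below) =====
def Claim_equal_solution : Prop := ∀ (numbers : List Int), Dom_solution numbers → Pre_solution numbers → Spec_solution numbers (solution numbers)

-- ===== LEMMAS AND PROOFS =====

-- positional read of a character, default '0'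
def pc (s : List Char) (i : Nat) : Char := s.getD i '0'

-- lowest set bit of a positive number (2^(number of trailing zero bits))
def low (n : Nat) : Nat := n ^^^ (n &&& (n - 1))

-- A's per-node condition at the even 1-based position 2*i
def okAt (s : List Char) (i : Nat) : Prop :=
  pc s (2 * i - 1) = '0' →
    pc s (2 * i - low i - 1) ≠ '1' ∧ pc s (2 * i + low i - 1) ≠ '1'

def NoBad (s : List Char) : Prop := ∀ i, 0 < i → 2 * i ≤ s.length → okAt s i

def allBits (s : List Char) : Prop := ∀ c ∈ s, c = '0' ∨ c = '1'

-- bounded lowest-set-bit facts, all indices ≤ 63, discharged by decide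
lemma lowD1 : ∀ i < 32, 0 < i →
    PySem.Int.floordiv (PySem.Int.band ((2 * i : Nat) : Int) (-((2 * i : Nat) : Int))) 2
      = ((low i : Nat) : Int) := by decide

lemma lowF2 : ∀ k < 6, ∀ j < 2 ^ k, 0 < j → low (2 ^ k + j) = low j := by decide

lemma lowF3 : ∀ t < 7, ∀ i < 64, 0 < i → 2 * i ≤ 2 ^ t - 1 →
    low i ≤ 2 * i - 1 ∧ 2 * i + low i ≤ 2 ^ t - 1 := by decide

lemma lowF4 : ∀ k < 6, low (2 ^ k) = 2 ^ k := by decide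

lemma pc_append_left (u w : List Char) (p : Nat) (h : p < u.length) :
    pc (u ++ w) p = pc u p := by
  simp [pc, List.getD, List.getElem?_append_left h]

lemma pc_append_mid (u v : List Char) (c : Char) :
    pc (u ++ c :: v) u.length = c := by
  simp [pc, List.getD]

lemma pc_append_right (u v : List Char) (c : Char) (q : Nat) :
    pc (u ++ c :: v) (u.length + 1 + q) = pc v q := by
  simp only [pc, List.getD]
  rw [List.getElem?_append_right (by omega), show u.length + 1 + q - u.length = q + 1 by omega]
  simp

lemma binChars_bits : ∀ n, allBits (binChars n) := by
  intro n
  induction n using Nat.strong_induction_on with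
  | _ n ih =>
    unfold binChars
    split
    · intro c hc; simp at hc
    · rename_i h
      intro c hc
      rw [List.mem_append] at hc
      rcases hc with h1 | h2
      · exact ih (n / 2) (Nat.div_lt_self (by omega) one_lt_two) c h1
      · simp only [List.mem_singleton] at h2
        subst h2
        split <;> simp

lemma binChars_lt : ∀ n, n < 2 ^ (binChars n).length := by
  intro n
  induction n using Nat.strong_induction_on with
  | _ n ih =>
    unfold binChars
    split
    · simp; omega
    · rename_i h
      simp only [List.length_append, List.length_singleton, pow_succ]
      have h1 := ih (n / 2) (Nat.div_lt_self (by omega) one_lt_two)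
      omega

lemma binChars_le : ∀ n, ∀ k : Nat, n < 2 ^ k → (binChars n).length ≤ k := by
  intro n
  induction n using Nat.strong_induction_on with
  | _ n ih =>
    intro k hk
    unfold binChars
    split
    · simp
    · rename_i h
      have hk0 : k ≠ 0 := by rintro rfl; simp at hk; omega
      have h2 : 2 ^ k = 2 * 2 ^ (k - 1) := by
        rw [← pow_succ']; congr 1; omega
      have h1 := ih (n / 2) (Nat.div_lt_self (by omega) one_lt_two) (k - 1) (by omega)
      simp only [List.length_append, List.length_singleton]
      omega

lemma binChars_ne_nil (n : Nat) (h : 0 < n) : binChars n ≠ [] := by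
  unfold binChars
  split
  · omega
  · simp

lemma zfill_bits (cs : List Char) (w : Int) (h : allBits cs) :
    allBits (PySem.Chars.zfill cs w) := by
  unfold PySem.Chars.zfill
  split
  · exact h
  · match cs, h with
    | [], _ => intro c hc; rw [List.eq_of_mem_replicate hc]; left; rfl
    | c :: rest, h =>
      have hc01 : c = '0' ∨ c = '1' := h c (by simp)
      have hpm : ¬ (c = '+' ∨ c = '-') := by rcases hc01 with rfl | rfl <;> simp
      show allBits
        (if c = '+' ∨ c = '-' then c :: (List.replicate (w.toNat - (c :: rest).length) '0' ++ rest)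
         else List.replicate (w.toNat - (c :: rest).length) '0' ++ c :: rest)
      rw [if_neg hpm]
      intro d hd
      rw [List.mem_append] at hd
      rcases hd with hd | hd
      · rw [List.eq_of_mem_replicate hd]; left; rfl
      · exact h d hd

-- decomposition of NoBad at the root of a complete layout
lemma decomp (k : Nat) (hk1 : 1 ≤ k) (hk : k ≤ 5) (u v : List Char) (c : Char)
    (hu : u.length = 2 ^ k - 1) (hv : v.length = 2 ^ k - 1) :
    NoBad (u ++ c :: v) ↔
      NoBad u ∧ NoBad v ∧
        (c = '0' → pc u (2 ^ (k - 1) - 1) ≠ '1' ∧ pc v (2 ^ (k - 1) - 1) ≠ '1') := by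
  set P := 2 ^ (k - 1) with hPdef
  have hP : 0 < P := hPdef ▸ Nat.two_pow_pos (k - 1)
  have h2P : 2 * P = 2 ^ k := by rw [hPdef, ← pow_succ']; congr 1; omega
  have hpow : 2 ^ k ≤ 32 := by
    calc 2 ^ k ≤ 2 ^ 5 := Nat.pow_le_pow_right (by norm_num) hk
    _ = 32 := rfl
  have hL : u.length = 2 * P - 1 := by omega
  have hLv : v.length = 2 * P - 1 := by omega
  have hlen : (u ++ c :: v).length = 4 * P - 1 := by
    simp only [List.length_append, List.length_cons]; omega
  have hleft : ∀ p, p < u.length → pc (u ++ c :: v) p = pc u p :=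
    fun p hp => pc_append_left u (c :: v) p hp
  have hmid : pc (u ++ c :: v) u.length = c := pc_append_mid u v c
  have hright : ∀ q, pc (u ++ c :: v) (u.length + 1 + q) = pc v q :=
    fun q => pc_append_right u v c q
  have hF3 : ∀ i, 0 < i → 2 * i ≤ 2 * P - 1 → low i ≤ 2 * i - 1 ∧ 2 * i + low i ≤ 2 * P - 1 := by
    intro i hi h2
    have h := lowF3 k (by omega) i (by omega) hi (by omega)
    omega
  have leftOk : ∀ i, 0 < i → 2 * i ≤ 2 * P - 1 → (okAt (u ++ c :: v) i ↔ okAt u i) := by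
    intro i hi h2
    have hf := hF3 i hi h2
    unfold okAt
    rw [hleft (2 * i - 1) (by omega), hleft (2 * i - low i - 1) (by omega),
        hleft (2 * i + low i - 1) (by omega)]
  have midOk : okAt (u ++ c :: v) P ↔ (c = '0' → pc u (P - 1) ≠ '1' ∧ pc v (P - 1) ≠ '1') := by
    have hlp : low P = P := by rw [hPdef]; exact lowF4 (k - 1) (by omega)
    unfold okAt
    rw [show 2 * P - 1 = u.length from by omega, hmid,
        show 2 * P - low P - 1 = P - 1 from by rw [hlp]; omega,
        hleft (P - 1) (by omega),
        show 2 * P + low P - 1 = u.length + 1 + (P - 1) from by rw [hlp]; omega,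
        hright (P - 1)]
  have rightOk : ∀ j, 0 < j → 2 * j ≤ 2 * P - 1 → (okAt (u ++ c :: v) (P + j) ↔ okAt v j) := by
    intro j hj h2
    have hlj : low (P + j) = low j := by
      rw [hPdef]; exact lowF2 (k - 1) (by omega) j (by omega) hj
    have hfj := hF3 j hj h2
    unfold okAt
    rw [hlj,
        show 2 * (P + j) - 1 = u.length + 1 + (2 * j - 1) from by omega,
        hright _,
        show 2 * (P + j) - low j - 1 = u.length + 1 + (2 * j - low j - 1) from by omega,
        hright _,
        show 2 * (P + j) + low j - 1 = u.length + 1 + (2 * j + low j - 1) from by omega,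
        hright _]
  constructor
  · intro h
    refine ⟨?_, ?_, midOk.mp (h P (by omega) (by rw [hlen]; omega))⟩
    · intro i hi h2i
      exact (leftOk i hi (by omega)).mp (h i hi (by rw [hlen]; omega))
    · intro j hj h2j
      exact (rightOk j hj (by omega)).mp (h (P + j) (by omega) (by rw [hlen]; omega))
  · rintro ⟨hU, hV, hM⟩ i hi h2i
    rw [hlen] at h2i
    rcases lt_trichotomy i P with hlt | heq | hgt
    · exact (leftOk i hi (by omega)).mpr (hU i hi (by omega))
    · subst heq; exact midOk.mpr hM
    · have hj : 0 < i - P := by omega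
      have hiPj : i = P + (i - P) := by omega
      rw [hiPj]
      exact (rightOk (i - P) hj (by omega)).mpr (hV (i - P) hj (by omega))

lemma split_mid (s : List Char) (m : Nat) (hm : m < s.length) :
    s = s.take m ++ s[m] :: s.drop (m + 1) := by
  conv_lhs => rw [← List.take_append_drop m s]
  rw [List.drop_eq_getElem_cons hm]

-- a '0' root of a NoBad complete layout forces the whole string to be zero
lemma zero_prop : ∀ k, 1 ≤ k → k ≤ 6 → ∀ s : List Char, s.length = 2 ^ k - 1 →
    allBits s → NoBad s → pc s (2 ^ (k - 1) - 1) = '0' → ∀ c ∈ s, c = '0' := by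
  intro k
  induction k using Nat.strong_induction_on with
  | _ k ih =>
    intro hk1 hk6 s hs hb hnb hmid
    rcases eq_or_lt_of_le hk1 with heq | hk2
    · -- k = 1 : a single character, which is the root
      rw [← heq] at hs
      simp only [pow_one] at hs
      match s, hs with
      | [a], _ =>
        intro c hc
        simp only [List.mem_singleton] at hc
        subst hc
        simpa [pc, List.getD, ← heq] using hmid
    · have e2 : 2 ^ k = 2 * 2 ^ (k - 1) := by rw [← pow_succ']; congr 1; omega
      have e3 : 2 ^ (k - 1) = 2 * 2 ^ (k - 2) := by rw [← pow_succ']; congr 1; omega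
      have p1 : 0 < 2 ^ (k - 2) := Nat.two_pow_pos _
      set m := 2 ^ (k - 1) - 1 with hmdef
      have hm : m < s.length := by omega
      have hsplit := split_mid s m hm
      have hu : (s.take m).length = 2 ^ (k - 1) - 1 := by
        simp only [List.length_take]; omega
      have hv : (s.drop (m + 1)).length = 2 ^ (k - 1) - 1 := by
        simp only [List.length_drop]; omega
      have hnb' : NoBad (s.take m ++ s[m] :: s.drop (m + 1)) := by rw [← hsplit]; exact hnb
      obtain ⟨hnu, hnv, hmidc⟩ :=
        (decomp (k - 1) (by omega) (by omega) _ _ _ hu hv).mp hnb'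
      have hc0 : s[m] = '0' := by
        have h1 : pc (s.take m ++ s[m] :: s.drop (m + 1)) (s.take m).length = s[m] :=
          pc_append_mid _ _ _
      -- the root read through the split is hmid's character
        rw [← hsplit, hu, ← hmdef] at h1
        rw [← h1]; exact hmid
      have hch := hmidc hc0
      have hbu : allBits (s.take m) := fun c hc => hb c (List.mem_of_mem_take hc)
      have hbv : allBits (s.drop (m + 1)) := fun c hc => hb c (List.mem_of_mem_drop hc)
      have hmu : pc (s.take m) (2 ^ (k - 1 - 1) - 1) = '0' := by
        have hlt : 2 ^ (k - 1 - 1) - 1 < (s.take m).length := by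
          have : k - 1 - 1 = k - 2 := by omega
          rw [this, hu]; omega
        have := List.getD_eq_getElem (s.take m) '0' hlt
        rcases hbu _ (List.getElem_mem hlt) with h0 | h1
        · unfold pc; rw [this, h0]
        · exact absurd ((List.getD_eq_getElem _ '0' hlt).trans h1) hch.1
      have hmv : pc (s.drop (m + 1)) (2 ^ (k - 1 - 1) - 1) = '0' := by
        have hlt : 2 ^ (k - 1 - 1) - 1 < (s.drop (m + 1)).length := by
          have : k - 1 - 1 = k - 2 := by omega
          rw [this, hv]; omega
        have := List.getD_eq_getElem (s.drop (m + 1)) '0' hlt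
        rcases hbv _ (List.getElem_mem hlt) with h0 | h1
        · unfold pc; rw [this, h0]
        · exact absurd ((List.getD_eq_getElem _ '0' hlt).trans h1) hch.2
      have hu0 := ih (k - 1) (by omega) (by omega) (by omega) _ hu hbu hnu hmu
      have hv0 := ih (k - 1) (by omega) (by omega) (by omega) _ hv hbv hnv hmv
      intro c hc
      rw [hsplit] at hc
      rw [List.mem_append, List.mem_cons] at hc
      rcases hc with hc | hc | hc
      · exact hu0 c hc
      · rw [hc, hc0]
      · exact hv0 c hc

lemma valid_iff : ∀ k, 1 ≤ k → k ≤ 6 → ∀ s : List Char, s.length = 2 ^ k - 1 →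
    allBits s → (validB s = true ↔ NoBad s) := by
  intro k
  induction k using Nat.strong_induction_on with
  | _ k ih =>
    intro hk1 hk6 s hs hb
    rcases eq_or_lt_of_le hk1 with heq | hk2
    · rw [← heq] at hs
      simp only [pow_one] at hs
      constructor
      · intro _ i hi h2i
        rw [hs] at h2i
        exact absurd h2i (by omega)
      · intro _
        rw [validB, if_pos (by omega : s.length ≤ 1)]
    · have e2 : 2 ^ k = 2 * 2 ^ (k - 1) := by rw [← pow_succ']; congr 1; omega
      have p1 : 0 < 2 ^ (k - 1) := Nat.two_pow_pos _
      have p2 : 2 ≤ 2 ^ (k - 1) := by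
        calc 2 = 2 ^ 1 := rfl
        _ ≤ 2 ^ (k - 1) := Nat.pow_le_pow_right (by norm_num) (by omega)
      set m := 2 ^ (k - 1) - 1 with hmdef
      have hm : m < s.length := by omega
      have hm2 : s.length / 2 = m := by omega
      have hsplit := split_mid s m hm
      have hu : (s.take m).length = 2 ^ (k - 1) - 1 := by
        simp only [List.length_take]; omega
      have hv : (s.drop (m + 1)).length = 2 ^ (k - 1) - 1 := by
        simp only [List.length_drop]; omega
      have hbu : allBits (s.take m) := fun c hc => hb c (List.mem_of_mem_take hc)
      have hbv : allBits (s.drop (m + 1)) := fun c hc => hb c (List.mem_of_mem_drop hc)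
      have hdecomp := decomp (k - 1) (by omega) (by omega) (s.take m) (s.drop (m + 1)) (s[m]'hm) hu hv
      have hnble : NoBad s ↔ NoBad (s.take m ++ s[m] :: s.drop (m + 1)) := by
        rw [← hsplit]
      rw [validB, if_neg (by omega : ¬ s.length ≤ 1)]
      dsimp only
      rw [hm2, List.getD_eq_getElem s ' ' hm]
      rcases hb s[m] (List.getElem_mem hm) with h0 | h1
      · -- root '0': validB is the all-zero test
        rw [h0, if_neg (by decide : ¬ ('0' : Char) = '1')]
        constructor
        · intro hcont
          rw [Bool.not_eq_eq_eq_not, Bool.not_true] at hcont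
          have hnotmem : ¬ '1' ∈ s := by simpa using hcont
          have hpc : ∀ p, pc s p ≠ '1' := by
            intro p
            by_cases hp : p < s.length
            · have hg := List.getD_eq_getElem s '0' hp
              intro hq
              exact hnotmem ((hg.symm.trans hq) ▸ List.getElem_mem hp)
            · unfold pc
              rw [List.getD_eq_default _ _ (by omega)]
              decide
          intro i hi h2i _
          exact ⟨hpc _, hpc _⟩
        · intro hnb
          have hmid0 : pc s (2 ^ (k - 1) - 1) = '0' := by
            unfold pc
            rw [← hmdef, List.getD_eq_getElem s '0' hm]
            exact h0
          have hall := zero_prop k (by omega) (by omega) s hs hb hnb hmid0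
          have hnotmem : ¬ '1' ∈ s := fun h => absurd (hall '1' h) (by decide)
          simp [hnotmem]
      · -- root '1': recurse on the two halves
        rw [h1, if_pos rfl]
        have ihu := ih (k - 1) (by omega) (by omega) (by omega) _ hu hbu
        have ihv := ih (k - 1) (by omega) (by omega) (by omega) _ hv hbv
        rw [hnble, hdecomp]
        constructor
        · intro h
          simp only [Bool.and_eq_true] at h
          refine ⟨ihu.mp h.1, ihv.mp h.2, ?_⟩
          intro h01
          rw [h1] at h01
          exact absurd h01 (by decide)
        · rintro ⟨ha, hb', _⟩
          simp only [Bool.and_eq_true]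
          exact ⟨ihu.mpr ha, ihv.mpr hb'⟩

lemma loopA_zero_or_one (l : List (Int × Char)) (fill : List Char) :
    loopA l fill = 0 ∨ loopA l fill = 1 := by
  induction l with
  | nil => right; rfl
  | cons p rest ih =>
    obtain ⟨idx, val⟩ := p
    rw [loopA]
    dsimp only
    split
    · split
      · split
        · left; rfl
        · exact ih
      · left; rfl
    · exact ih

lemma pc_eq_getElem (s : List Char) (p : Nat) (h : p < s.length) : pc s p = s[p] :=
  List.getD_eq_getElem s '0' h

lemma loop_iff (s : List Char) (k : Nat) (hk : k ≤ 6) (hs : s.length = 2 ^ k - 1)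
    (hb : allBits s) :
    ∀ fuel j, s.length - j = fuel → j ≤ s.length →
      (loopA (PySem.List.enumerate (s.drop j) ((j : Int) + 1)) s = 1 ↔
        ∀ i, 0 < i → j < 2 * i → 2 * i ≤ s.length → okAt s i) := by
  have hlen63 : s.length ≤ 63 := by
    have h26 : (2 : Nat) ^ k ≤ 2 ^ 6 := Nat.pow_le_pow_right (by norm_num) hk
    omega
  intro fuel
  induction fuel with
  | zero =>
    intro j hfj hj
    rw [List.drop_eq_nil_of_le (by omega), PySem.List.enumerate_nil]
    constructor
    · intro _ i hi hji h2i
      exact absurd h2i (by omega)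
    · intro _
      rfl
  | succ f ihf =>
    intro j hfj hj
    have hjlt : j < s.length := by omega
    have hc1 : (j : Int) + 1 = ((j + 1 : Nat) : Int) := by push_cast; ring
    rw [List.drop_eq_getElem_cons hjlt, PySem.List.enumerate_cons, loopA]
    dsimp only
    have hrec := ihf (j + 1) (by omega) (by omega)
    have hstart : (j : Int) + 1 + 1 = ((j + 1 : Nat) : Int) + 1 := by push_cast; ring
    have hpcj : pc s j = s[j] := pc_eq_getElem s j hjlt
    by_cases hev : (j + 1) % 2 = 0
    · -- even 1-based position
      have hi0 : 0 < (j + 1) / 2 := by omega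
      set i₀ := (j + 1) / 2 with hi0def
      have hj2 : j + 1 = 2 * i₀ := by omega
      have hF := lowF3 k (by omega) i₀ (by omega) hi0 (by omega)
      rcases hb s[j] (List.getElem_mem hjlt) with h0 | h1
      · -- value '0': A probes the two children
        rw [if_pos ⟨by rw [hc1, PySem.Int.mod_eq_emod_of_pos (by norm_num)]; omega, h0⟩]
        have hD1 := lowD1 i₀ (by omega) hi0
        have hband : PySem.Int.floordiv (PySem.Int.band ((j : Int) + 1) (-((j : Int) + 1))) 2
            = ((low i₀ : Nat) : Int) := by
          rw [hc1, hj2]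
          exact hD1
        rw [hband]
        have hbefpos : 2 * i₀ - low i₀ - 1 < s.length := by omega
        have haftpos : 2 * i₀ + low i₀ - 1 < s.length := by omega
        have hbef : PySem.List.pyGet? s ((j : Int) + 1 - ((low i₀ : Nat) : Int) - 1)
            = some (s[2 * i₀ - low i₀ - 1]'hbefpos) := by
          rw [show (j : Int) + 1 - ((low i₀ : Nat) : Int) - 1
                = ((2 * i₀ - low i₀ - 1 : Nat) : Int) from by omega,
              PySem.List.pyGet?_natCast, List.getElem?_eq_getElem hbefpos]
        have haft : PySem.List.pyGet? s ((j : Int) + 1 + ((low i₀ : Nat) : Int) - 1)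
            = some (s[2 * i₀ + low i₀ - 1]'haftpos) := by
          rw [show (j : Int) + 1 + ((low i₀ : Nat) : Int) - 1
                = ((2 * i₀ + low i₀ - 1 : Nat) : Int) from by omega,
              PySem.List.pyGet?_natCast, List.getElem?_eq_getElem haftpos]
        rw [hbef, haft]
        dsimp only
        have hpcb : pc s (2 * i₀ - low i₀ - 1) = s[2 * i₀ - low i₀ - 1]'hbefpos :=
          pc_eq_getElem s _ hbefpos
        have hpca : pc s (2 * i₀ + low i₀ - 1) = s[2 * i₀ + low i₀ - 1]'haftpos :=
          pc_eq_getElem s _ haftpos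
        have hroot : pc s (2 * i₀ - 1) = '0' := by
          rw [show 2 * i₀ - 1 = j from by omega, hpcj, h0]
        rcases hb _ (List.getElem_mem hbefpos) with hb0 | hb1 <;>
          rcases hb _ (List.getElem_mem haftpos) with ha0 | ha1
        · -- both children '0': the node is fine, continue
          rw [hb0, ha0, if_neg (show ¬ (toInt1 '0' + toInt1 '0' ≠ 0) by decide),
              hstart, hrec]
          constructor
          · intro h i hi hji h2i
            rcases Nat.lt_or_ge (j + 1) (2 * i) with hgt | hle
            · exact h i hi hgt h2i
            · have hie : i = i₀ := by omega
              subst hie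
              intro _
              constructor
              · rw [hpcb, hb0]; decide
              · rw [hpca, ha0]; decide
          · intro h i hi hji h2i
            exact h i hi (by omega) h2i
        all_goals try (
          first
          | (rw [hb0, ha1, if_pos (show toInt1 '0' + toInt1 '1' ≠ 0 by decide)]
             constructor
             · intro h; exact absurd h (by decide)
             · intro h
               exact absurd ((h i₀ hi0 (by omega) (by omega)) hroot).2 (by rw [hpca, ha1]; simp)
            )
          | (rw [hb1, ha0, if_pos (show toInt1 '1' + toInt1 '0' ≠ 0 by decide)]
             constructor
             · intro h; exact absurd h (by decide)
             · intro h
               exact absurd ((h i₀ hi0 (by omega) (by omega)) hroot).1 (by rw [hpcb, hb1]; simp)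
            )
          | (rw [hb1, ha1, if_pos (show toInt1 '1' + toInt1 '1' ≠ 0 by decide)]
             constructor
             · intro h; exact absurd h (by decide)
             · intro h
               exact absurd ((h i₀ hi0 (by omega) (by omega)) hroot).1 (by rw [hpcb, hb1]; simp)
            ))
      · -- value '1': the branch is skipped, and the node imposes nothing
        rw [if_neg (by rintro ⟨-, hq⟩; rw [h1] at hq; exact absurd hq (by decide)),
            hstart, hrec]
        constructor
        · intro h i hi hji h2i
          rcases Nat.lt_or_ge (j + 1) (2 * i) with hgt | hle
          · exact h i hi hgt h2i
          · have hie : i = i₀ := by omega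
            subst hie
            intro hpre
            rw [show 2 * i₀ - 1 = j from by omega, hpcj, h1] at hpre
            exact absurd hpre (by decide)
        · intro h i hi hji h2i
          exact h i hi (by omega) h2i
    · -- odd 1-based position: never a probed node
      rw [if_neg (by
            rintro ⟨hm0, -⟩
            rw [hc1, PySem.Int.mod_eq_emod_of_pos (by norm_num)] at hm0
            omega),
          hstart, hrec]
      constructor
      · intro h i hi hji h2i
        exact h i hi (by omega) h2i
      · intro h i hi hji h2i
        exact h i hi (by omega) h2i

lemma key_loop (s : List Char) (k : Nat) (hk1 : 1 ≤ k) (hk6 : k ≤ 6)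
    (hsl : s.length = 2 ^ k - 1) (hsb : allBits s) :
    loopA (PySem.List.enumerate s 1) s = if validB s then 1 else 0 := by
  have hl := loop_iff s k hk6 hsl hsb s.length 0 (by omega) (by omega)
  rw [List.drop_zero] at hl
  simp only [Nat.cast_zero, zero_add] at hl
  have hv := valid_iff k hk1 hk6 s hsl hsb
  by_cases h : validB s = true
  · rw [if_pos h]
    exact hl.mpr (fun i hi _ h2 => (hv.mp h) i hi h2)
  · rw [if_neg h]
    rcases loopA_zero_or_one (PySem.List.enumerate s 1) s with hz | ho
    · exact hz
    · exact absurd (hv.mpr (fun i hi h2 => hl.mp ho i hi (by omega) h2)) h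

lemma per_num (num : Int) (h0 : 0 ≤ num) (hD : num ≤ 2147483648) :
    proofA num = checkB num := by
  have hbits : allBits (pyBinDigits num) := by
    unfold pyBinDigits
    split
    · intro c hc; simp only [List.mem_singleton] at hc; left; exact hc
    · exact binChars_bits num.toNat
  have hpos : 0 < (pyBinDigits num).length := by
    unfold pyBinDigits
    split
    · simp
    · exact List.length_pos_of_ne_nil (binChars_ne_nil num.toNat (by omega))
  have hlen32 : (pyBinDigits num).length ≤ 32 := by
    unfold pyBinDigits
    split
    · simp
    · exact binChars_le num.toNat 32
        (by simp only [show (2 : Nat) ^ 32 = 4294967296 from by norm_num]; omega)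
  have hbig : pyBinDigits ((pyBinDigits num).length : Int)
      = binChars (pyBinDigits num).length := by
    unfold pyBinDigits
    rw [if_neg (by exact_mod_cast Nat.pos_iff_ne_zero.mp hpos), Int.toNat_natCast]
  set K := (pyBinDigits ((pyBinDigits num).length : Int)).length with hKdef
  have hKb : K = (binChars (pyBinDigits num).length).length := by rw [hKdef, hbig]
  have hK1 : 1 ≤ K := by
    rw [hKb]
    exact List.length_pos_of_ne_nil (binChars_ne_nil _ hpos)
  have hK6 : K ≤ 6 := by
    rw [hKb]
    exact binChars_le _ 6 (by simp only [show (2 : Nat) ^ 6 = 64 from by norm_num]; omega)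
  have hlt : (pyBinDigits num).length < 2 ^ K := hKb ▸ binChars_lt (pyBinDigits num).length
  have hcastpow : ((2 : Int) ^ K - 1).toNat = 2 ^ K - 1 := by
    have h2 : ((2 : Int) ^ K) = ((2 ^ K : Nat) : Int) := by push_cast; ring
    have h3 : (1 : Nat) ≤ 2 ^ K := Nat.one_le_two_pow
    rw [h2]
    omega
  have hflen : (PySem.Chars.zfill (pyBinDigits num) ((2 : Int) ^ K - 1)).length
      = 2 ^ K - 1 := by
    rw [PySem.Chars.length_zfill, hcastpow]
    omega
  have hfb : allBits (PySem.Chars.zfill (pyBinDigits num) ((2 : Int) ^ K - 1)) :=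
    zfill_bits _ _ hbits
  unfold proofA checkB
  dsimp only
  exact key_loop _ K hK1 hK6 hflen hfb

lemma foldl_append_map (l : List Int) :
    ∀ acc : List Int, (∀ n ∈ l, 0 ≤ n) → (∀ n ∈ l, pvDomInt n = true) →
      l.foldl (fun answer num => answer ++ [proofA num]) acc = acc ++ l.map checkB := by
  induction l with
  | nil => intro acc _ _; simp
  | cons x t ih =>
    intro acc hp hd
    simp only [List.foldl_cons, List.map_cons]
    rw [ih (acc ++ [proofA x]) (fun n hn => hp n (by simp [hn]))
        (fun n hn => hd n (by simp [hn]))]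
    have hx := hd x (by simp)
    simp only [pvDomInt, decide_eq_true_eq] at hx
    rw [per_num x (hp x (by simp)) hx.2]
    simp

-- ===== VERDICT (by name: the statement is the Claim_ definition above) =====
theorem solution_spec : Claim_equal_solution := by
  unfold Claim_equal_solution
  intro numbers hdom hpre
  unfold Spec_solution solution solution_alt
  have hdom' : ∀ n ∈ numbers, pvDomInt n = true := by
    unfold Dom_solution at hdom
    rw [List.all_eq_true] at hdom
    exact fun n hn => hdom n hn
  rw [foldl_append_map numbers [] hpre hdom']
  simp
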